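-- pv_equiv track=rewrite | github.com/typedin/codingame | rugby/src/solution.py | solution
-- ===== SOURCE A (Python) =====
-- def solution(score):
--     tryValue = 5
--     convValue = 2
--     kickValue = 3
--
--     if score == 1 or score == 2 or score == 4:
--         return ["0 0 0"]
--
--     if score == 3:
--         return ["0 0 1"]
--
--     result = []
--
--     def scoreIsValid(numTry, numConv, numKick):
--         if numTry < numConv:
--             return False
--         return (
--             (numTry * tryValue) +
--             (numConv * convValue) +
--             (numKick * kickValue) == score)
--
--     for numTry in range(0, score//2):
--         for numConv in range(0, score//2):
--             for numKick in range(0, score//2):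
--                 if scoreIsValid(numTry, numConv, numKick):
--                     result.append("{} {} {}".format(numTry, numConv, numKick))
--
--     return result
-- ===== SOURCE B (Python) =====
-- def solution(score):
--     if score in (1, 2, 4):
--         return ["0 0 0"]
--     if score == 3:
--         return ["0 0 1"]
--     result = []
--     for numTry in range(score // 2):
--         for numConv in range(numTry + 1):
--             rest = score - 5 * numTry - 2 * numConv
--             if rest >= 0 and rest % 3 == 0:
--                 result.append("{} {} {}".format(numTry, numConv, rest // 3))
--     return result
-- ===== Notes on version B (the rewrite author's own statement) =====
-- stated objective: faster
-- what changed: the innermost loop over numKick is removed: the kick count is computed directly from the remainder score-5*numTry-2*numConv via a nonnegativity and divisibility-by-3 check, and the conversion loop is bounded by numTry+1 instead of score//2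
import Mathlib
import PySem

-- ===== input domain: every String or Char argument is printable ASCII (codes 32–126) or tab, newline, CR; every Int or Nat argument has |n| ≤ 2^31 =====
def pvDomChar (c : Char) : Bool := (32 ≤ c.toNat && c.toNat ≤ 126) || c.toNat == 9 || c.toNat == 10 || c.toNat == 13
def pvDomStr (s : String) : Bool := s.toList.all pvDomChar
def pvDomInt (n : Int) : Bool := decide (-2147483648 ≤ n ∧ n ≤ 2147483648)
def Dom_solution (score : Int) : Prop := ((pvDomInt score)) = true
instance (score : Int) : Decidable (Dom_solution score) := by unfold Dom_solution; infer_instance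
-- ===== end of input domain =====

-- B drops A's innermost loop: the kick count is computed directly from the remainder
-- (nonnegativity + divisibility by 3), and the conversion loop stops at numTry (faster).

-- ===== PORT A =====
def pvFmt3 (t c k : Int) : String :=
  PySem.Int.toStr t ++ " " ++ PySem.Int.toStr c ++ " " ++ PySem.Int.toStr k

def scoreIsValid (score numTry numConv numKick : Int) : Bool :=
  if numTry < numConv then false
  else decide (numTry * 5 + numConv * 2 + numKick * 3 = score)

def solution (score : Int) : List String :=
  if score == 1 || score == 2 || score == 4 then ["0 0 0"]
  else if score == 3 then ["0 0 1"]
  else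
    (PySem.List.pyRange 0 (PySem.Int.floordiv score 2) 1).foldl (fun result numTry =>
      (PySem.List.pyRange 0 (PySem.Int.floordiv score 2) 1).foldl (fun result numConv =>
        (PySem.List.pyRange 0 (PySem.Int.floordiv score 2) 1).foldl (fun result numKick =>
          if scoreIsValid score numTry numConv numKick then
            result ++ [pvFmt3 numTry numConv numKick]
          else result) result) result) []

-- ===== PORT B =====
def solution_alt (score : Int) : List String :=
  if score == 1 || score == 2 || score == 4 then ["0 0 0"]
  else if score == 3 then ["0 0 1"]
  else
    (PySem.List.pyRange 0 (PySem.Int.floordiv score 2) 1).foldl (fun result numTry =>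
      (PySem.List.pyRange 0 (numTry + 1) 1).foldl (fun result numConv =>
        let rest := score - 5 * numTry - 2 * numConv
        if 0 ≤ rest ∧ PySem.Int.mod rest 3 = 0 then
          result ++ [pvFmt3 numTry numConv (PySem.Int.floordiv rest 3)]
        else result) result) []

-- ===== PRECONDITION & SPEC =====
def Spec_solution (score : Int) (out : List String) : Prop := out = solution_alt score
instance (score : Int) (out : List String) : Decidable (Spec_solution score out) := by unfold Spec_solution; infer_instance

-- ===== CLAIM (what is proved, stated in full; the proofs are below) =====
def Claim_equal_solution : Prop := ∀ (score : Int), Dom_solution score → Spec_solution score (solution score)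

-- ===== LEMMAS AND PROOFS =====

theorem pv_foldl_funext_mem {α β : Type} (f g : β → α → β) :
    ∀ (l : List α) (init : β), (∀ acc x, x ∈ l → f acc x = g acc x) →
      l.foldl f init = l.foldl g init := by
  intro l
  induction l with
  | nil => intro init h; rfl
  | cons a l ih =>
      intro init h
      simp only [List.foldl_cons]
      rw [h init a (by simp)]
      exact ih _ (fun acc x hx => h acc x (by simp [hx]))

theorem pv_foldl_append_ifB {α β : Type} (p : α → Bool) (f : α → β) :
    ∀ (l : List α) (acc : List β),
      l.foldl (fun a x => if p x then a ++ [f x] else a) acc = acc ++ (l.filter p).map f := by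
  intro l
  induction l with
  | nil => intro acc; simp
  | cons a l ih =>
      intro acc
      by_cases h : p a = true <;> simp [h, ih, List.append_assoc]

theorem pv_foldl_append_ifP {α β : Type} (p : α → Prop) [DecidablePred p] (f : α → β) :
    ∀ (l : List α) (acc : List β),
      l.foldl (fun a x => if p x then a ++ [f x] else a) acc
        = acc ++ (l.filter (fun x => decide (p x))).map f := by
  intro l
  induction l with
  | nil => intro acc; simp
  | cons a l ih =>
      intro acc
      by_cases h : p a <;> simp [h, ih, List.append_assoc]

theorem pv_foldl_append_flat {α β : Type} (K : α → List β) :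
    ∀ (l : List α) (acc : List β),
      l.foldl (fun a x => a ++ K x) acc = acc ++ l.flatMap K := by
  intro l
  induction l with
  | nil => intro acc; simp
  | cons a l ih => intro acc; simp [ih, List.append_assoc]

theorem pv_flatMap_ite {α β : Type} (p : α → Prop) [DecidablePred p] (g : α → β) :
    ∀ (l : List α),
      l.flatMap (fun x => if p x then [g x] else [])
        = (l.filter (fun x => decide (p x))).map g := by
  intro l
  induction l with
  | nil => simp
  | cons a l ih => by_cases h : p a <;> simp [h, ih]

theorem pv_flatMap_congr_mem {α β : Type} (f g : α → List β) :
    ∀ (l : List α), (∀ x ∈ l, f x = g x) → l.flatMap f = l.flatMap g := by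
  intro l
  induction l with
  | nil => intro _; rfl
  | cons a l ih =>
      intro h
      simp only [List.flatMap_cons]
      rw [h a (by simp), ih (fun x hx => h x (by simp [hx]))]

theorem pv_filter_range_nat (j : Nat) :
    ∀ (m : Nat), (List.range m).filter (fun k => decide (k = j)) = if j < m then [j] else [] := by
  intro m
  induction m with
  | zero => simp
  | succ m ih =>
      rw [List.range_succ, List.filter_append, ih]
      by_cases h : j < m
      · simp [h, Nat.lt_succ_of_lt h, Nat.ne_of_lt h |>.symm]
      · by_cases h2 : j = m
        · subst h2; simp
        · have hlt : ¬ j < m + 1 := by omega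
          have hne : ¬ m = j := by omega
          simp [h, hlt, hne]

theorem pv_filter_pyRange_eq (n x : Int) (h0 : 0 ≤ x) (hn : x < n) :
    (PySem.List.pyRange 0 n 1).filter (fun k => decide (k = x)) = [x] := by
  rw [PySem.List.pyRange_one]
  rw [List.filter_map]
  have hcongr : ∀ k ∈ List.range (n - 0).toNat,
      ((fun k => decide (k = x)) ∘ (fun k : Nat => (0 : Int) + k)) k
        = (fun k => decide (k = x.toNat)) k := by
    intro k hk
    simp only [Function.comp]
    have : ((k : Int) = x) ↔ (k = x.toNat) := by omega
    simp [this]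
  rw [List.filter_congr hcongr, pv_filter_range_nat]
  have hx : x.toNat < (n - 0).toNat := by omega
  rw [if_pos hx]
  simp
  omega

-- the list of kick counts A's innermost loop collects, for fixed numTry/numConv
theorem pv_kfilter (score t c : Int) (hs5 : 5 ≤ score) (ht : 0 ≤ t) (hc : 0 ≤ c) :
    ((PySem.List.pyRange 0 (PySem.Int.floordiv score 2) 1).filter
        (fun k => scoreIsValid score t c k)).map (pvFmt3 t c)
      = if c ≤ t ∧ 0 ≤ score - 5 * t - 2 * c ∧ PySem.Int.mod (score - 5 * t - 2 * c) 3 = 0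
        then [pvFmt3 t c (PySem.Int.floordiv (score - 5 * t - 2 * c) 3)] else [] := by
  have h2 : PySem.Int.floordiv score 2 = score / 2 :=
    PySem.Int.floordiv_eq_ediv_of_pos (by norm_num)
  have h3 : PySem.Int.mod (score - 5 * t - 2 * c) 3 = (score - 5 * t - 2 * c) % 3 :=
    PySem.Int.mod_eq_emod_of_pos (by norm_num)
  have h3' : PySem.Int.floordiv (score - 5 * t - 2 * c) 3 = (score - 5 * t - 2 * c) / 3 :=
    PySem.Int.floordiv_eq_ediv_of_pos (by norm_num)
  by_cases hcond : c ≤ t ∧ 0 ≤ score - 5 * t - 2 * c ∧ (score - 5 * t - 2 * c) % 3 = 0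
  · obtain ⟨hct, hr0, hr3⟩ := hcond
    set r := score - 5 * t - 2 * c with hr
    have hkey : ∀ k ∈ PySem.List.pyRange 0 (PySem.Int.floordiv score 2) 1,
        (fun k => scoreIsValid score t c k) k = (fun k => decide (k = r / 3)) k := by
      intro k _
      simp only [scoreIsValid, if_neg (by omega : ¬ t < c)]
      have : (t * 5 + c * 2 + k * 3 = score) ↔ (k = r / 3) := by omega
      simp [this]
    rw [List.filter_congr hkey]
    have hlt : r / 3 < PySem.Int.floordiv score 2 := by rw [h2]; omega
    rw [pv_filter_pyRange_eq _ _ (by omega) hlt]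
    rw [if_pos ⟨hct, by rw [h3]; exact ⟨hr0, hr3⟩⟩]
    simp
  · have hnone : ∀ k ∈ PySem.List.pyRange 0 (PySem.Int.floordiv score 2) 1,
        ¬ ((fun k => scoreIsValid score t c k) k = true) := by
      intro k hk
      have hkb := (PySem.List.mem_pyRange_one).1 hk
      simp only [scoreIsValid]
      split
      · simp
      · rename_i hnc
        simp only [decide_eq_true_eq]
        omega
    rw [List.filter_eq_nil_iff.2 hnone]
    rw [if_neg (by rw [h3]; exact hcond)]
    rfl

theorem pv_flatMap_split (t n : Int) (ht : 0 ≤ t) (htn : t < n) (K : Int → List String)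
    (P : Int → Prop) [DecidablePred P] (g : Int → String)
    (h1 : ∀ c, 0 ≤ c → c ≤ t → K c = if P c then [g c] else [])
    (h2 : ∀ c, t < c → K c = []) :
    (PySem.List.pyRange 0 n 1).flatMap K
      = ((PySem.List.pyRange 0 (t + 1) 1).filter (fun c => decide (P c))).map g := by
  rw [PySem.List.pyRange_one_append 0 (t + 1) n (by omega) (by omega), List.flatMap_append]
  have htail : (PySem.List.pyRange (t + 1) n 1).flatMap K = [] := by
    apply List.flatMap_eq_nil_iff.2
    intro c hc
    exact h2 c (by have := (PySem.List.mem_pyRange_one).1 hc; omega)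
  rw [htail, List.append_nil]
  rw [pv_flatMap_congr_mem K (fun c => if P c then [g c] else []) _
    (fun c hc => by
      have := (PySem.List.mem_pyRange_one).1 hc
      exact h1 c (by omega) (by omega))]
  exact pv_flatMap_ite P g _

-- the two inner double/single loops agree for every admitted numTry
theorem pv_inner_eq (score t : Int) (hs5 : 5 ≤ score) (ht : 0 ≤ t)
    (htn : t < PySem.Int.floordiv score 2) (acc : List String) :
    (PySem.List.pyRange 0 (PySem.Int.floordiv score 2) 1).foldl (fun result numConv =>
        (PySem.List.pyRange 0 (PySem.Int.floordiv score 2) 1).foldl (fun result numKick =>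
          if scoreIsValid score t numConv numKick then
            result ++ [pvFmt3 t numConv numKick]
          else result) result) acc
      = (PySem.List.pyRange 0 (t + 1) 1).foldl (fun result numConv =>
          let rest := score - 5 * t - 2 * numConv
          if 0 ≤ rest ∧ PySem.Int.mod rest 3 = 0 then
            result ++ [pvFmt3 t numConv (PySem.Int.floordiv rest 3)]
          else result) acc := by
  simp only [pv_foldl_append_ifB, pv_foldl_append_ifP]
  rw [pv_foldl_append_flat]
  congr 1
  apply pv_flatMap_split t (PySem.Int.floordiv score 2) ht htn _
    (fun c => 0 ≤ score - 5 * t - 2 * c ∧ PySem.Int.mod (score - 5 * t - 2 * c) 3 = 0)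
    (fun c => pvFmt3 t c (PySem.Int.floordiv (score - 5 * t - 2 * c) 3))
  · intro c hc0 hct
    rw [pv_kfilter score t c hs5 ht hc0]
    by_cases hP : 0 ≤ score - 5 * t - 2 * c ∧ PySem.Int.mod (score - 5 * t - 2 * c) 3 = 0
    · rw [if_pos ⟨hct, hP⟩, if_pos hP]
    · rw [if_neg (by tauto), if_neg hP]
  · intro c hct
    rw [pv_kfilter score t c hs5 ht (by omega)]
    rw [if_neg (by omega)]

-- ===== VERDICT (by name: the statement is the Claim_ definition above) =====
theorem solution_spec : Claim_equal_solution := by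
  intro score _
  unfold Spec_solution solution solution_alt
  split
  · rfl
  · split
    · rfl
    · rename_i h14 h3
      by_cases hn : PySem.Int.floordiv score 2 ≤ 0
      · rw [PySem.List.pyRange_one_eq_nil (by omega)]
        rfl
      · have h2 : PySem.Int.floordiv score 2 = score / 2 :=
          PySem.Int.floordiv_eq_ediv_of_pos (by norm_num)
        have hs5 : 5 ≤ score := by
          simp only [beq_iff_eq, Bool.or_eq_true, not_or] at h14 h3
          omega
        apply pv_foldl_funext_mem
        intro acc t ht
        have htb := (PySem.List.mem_pyRange_one).1 ht
        exact pv_inner_eq score t hs5 (by omega) (by omega) acc
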